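-- pv_equiv track=rewrite | github.com/letangphuquy/cp-problem-generator | run_phase_cached.py | parse_test_spec
-- ===== SOURCE A (Python) =====
-- from typing import Dict, List
--
-- def parse_test_spec(spec: str, total: int) -> List[str]:
--     if total <= 0:
--         return []
--
--     if spec.lower() == "all":
--         return [f"{i:02d}" for i in range(1, total + 1)]
--
--     requested: set[int] = set()
--     for token in spec.split(","):
--         token = token.strip()
--         if not token:
--             continue
--         if "-" in token:
--             a, b = token.split("-", 1)
--             if a.isdigit() and b.isdigit():
--                 start, end = int(a), int(b)
--                 if start <= end:
--                     for i in range(start, end + 1):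
--                         if 1 <= i <= total:
--                             requested.add(i)
--         elif token.isdigit():
--             i = int(token)
--             if 1 <= i <= total:
--                 requested.add(i)
--
--     return [f"{i:02d}" for i in sorted(requested)]
-- ===== SOURCE B (Python) =====
-- def parse_test_spec(spec: str, total: int):
--     # Interval-based: collect clamped [lo, hi] intervals per token, sort by lo,
--     # merge overlaps while scanning, and emit each merged run in ascending order
--     # (no per-element set, no final sort of elements).
--     if total <= 0:
--         return []
--
--     if spec.lower() == "all":
--         intervals = [(1, total)]
--     else:
--         intervals = []
--         for token in spec.split(","):
--             token = token.strip()
--             if not token: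
--                 continue
--             if "-" in token:
--                 a, b = token.split("-", 1)
--                 if a.isdigit() and b.isdigit():
--                     lo, hi = max(int(a), 1), min(int(b), total)
--                     if lo <= hi:
--                         intervals.append((lo, hi))
--             elif token.isdigit():
--                 i = int(token)
--                 if 1 <= i <= total:
--                     intervals.append((i, i))
--         intervals.sort(key=lambda p: p[0])
--
--     out = []
--     cur = None
--     for lo, hi in intervals:
--         if cur is None:
--             cur = (lo, hi)
--         elif lo <= cur[1]:
--             cur = (cur[0], max(cur[1], hi))
--         else:
--             out.extend(f"{i:02d}" for i in range(cur[0], cur[1] + 1))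
--             cur = (lo, hi)
--     if cur is not None:
--         out.extend(f"{i:02d}" for i in range(cur[0], cur[1] + 1))
--     return out
-- ===== Notes on version B (the rewrite author's own statement) =====
-- stated objective: alternative
-- what changed: Replaces A's per-element integer set plus final sort by clamped per-token intervals sorted by start and merged in a single scan that emits each run in ascending order (no per-element set membership, no element-level sort).
import Mathlib
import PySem

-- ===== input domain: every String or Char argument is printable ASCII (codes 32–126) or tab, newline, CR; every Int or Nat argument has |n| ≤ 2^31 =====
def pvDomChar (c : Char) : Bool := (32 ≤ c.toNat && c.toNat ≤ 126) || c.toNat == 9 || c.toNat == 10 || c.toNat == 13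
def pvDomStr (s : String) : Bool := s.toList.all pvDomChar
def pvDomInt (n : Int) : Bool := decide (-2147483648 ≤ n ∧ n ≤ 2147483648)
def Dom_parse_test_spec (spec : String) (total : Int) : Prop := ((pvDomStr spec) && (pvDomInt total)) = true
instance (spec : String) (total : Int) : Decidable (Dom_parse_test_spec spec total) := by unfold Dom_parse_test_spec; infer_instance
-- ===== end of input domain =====

-- B replaces A's per-element integer set + final sort by clamped intervals sorted by start and
-- merged in one scan, emitting each run in ascending order (alternative algorithm, same values).

-- f"{i:02d}" for 0 ≤ i (both programs only format i ≥ 1): zero-pad to width 2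
def pvPad (i : Int) : String :=
  if i < 10 then String.ofList ('0' :: PySem.Int.toChars i) else PySem.Int.toStr i

-- ===== PORT A =====
-- loop body of A's 'for token in spec.split(",")' (accumulator: the set 'requested')
def pvAStep (total : Int) (req : PySem.Set Int) (tok0 : String) : PySem.Set Int :=
  if PySem.Str.strip tok0 = "" then req
  else if PySem.Str.isIn "-" (PySem.Str.strip tok0) then
    match (PySem.Str.splitMax? (PySem.Str.strip tok0) "-" 1).getD [] with
    | [a, b] =>
      if PySem.Str.strIsdigit a && PySem.Str.strIsdigit b then
        if (PySem.Int.ofStr? a).getD 0 ≤ (PySem.Int.ofStr? b).getD 0 then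
          (PySem.List.pyRange ((PySem.Int.ofStr? a).getD 0) ((PySem.Int.ofStr? b).getD 0 + 1)).foldl
            (fun r i => if 1 ≤ i ∧ i ≤ total then r.add i else r) req
        else req
      else req
    | _ => req
  else if PySem.Str.strIsdigit (PySem.Str.strip tok0) then
    if 1 ≤ (PySem.Int.ofStr? (PySem.Str.strip tok0)).getD 0 ∧
        (PySem.Int.ofStr? (PySem.Str.strip tok0)).getD 0 ≤ total then
      req.add ((PySem.Int.ofStr? (PySem.Str.strip tok0)).getD 0)
    else req
  else req

def parse_test_spec (spec : String) (total : Int) : List String :=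
  if total ≤ 0 then []
  else if PySem.Str.lower spec = "all" then
    (PySem.List.pyRange 1 (total + 1)).map pvPad
  else
    (PySem.List.sorted
      (((PySem.Str.split? spec ",").getD []).foldl (pvAStep total) PySem.Set.empty)
      (fun x => x)).map pvPad

-- ===== PORT B =====
-- loop body of B's token loop (accumulator: the list 'intervals' of clamped pairs)
def pvBStep (total : Int) (acc : List (Int × Int)) (tok0 : String) : List (Int × Int) :=
  if PySem.Str.strip tok0 = "" then acc
  else if PySem.Str.isIn "-" (PySem.Str.strip tok0) then
    match (PySem.Str.splitMax? (PySem.Str.strip tok0) "-" 1).getD [] with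
    | [a, b] =>
      if PySem.Str.strIsdigit a && PySem.Str.strIsdigit b then
        if max ((PySem.Int.ofStr? a).getD 0) 1 ≤ min ((PySem.Int.ofStr? b).getD 0) total then
          acc ++ [(max ((PySem.Int.ofStr? a).getD 0) 1, min ((PySem.Int.ofStr? b).getD 0) total)]
        else acc
      else acc
    | _ => acc
  else if PySem.Str.strIsdigit (PySem.Str.strip tok0) then
    if 1 ≤ (PySem.Int.ofStr? (PySem.Str.strip tok0)).getD 0 ∧
        (PySem.Int.ofStr? (PySem.Str.strip tok0)).getD 0 ≤ total then
      acc ++ [((PySem.Int.ofStr? (PySem.Str.strip tok0)).getD 0,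
               (PySem.Int.ofStr? (PySem.Str.strip tok0)).getD 0)]
    else acc
  else acc

-- loop body of B's merge loop (state: (out, cur))
def pvMergeStep (st : List String × Option (Int × Int)) (pr : Int × Int) :
    List String × Option (Int × Int) :=
  match st.2 with
  | none => (st.1, some pr)
  | some c =>
    if pr.1 ≤ c.2 then (st.1, some (c.1, max c.2 pr.2))
    else (st.1 ++ (PySem.List.pyRange c.1 (c.2 + 1)).map pvPad, some pr)

-- B's final 'if cur is not None: out.extend(...)'
def pvFlush (st : List String × Option (Int × Int)) : List String :=
  match st.2 with
  | none => st.1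
  | some c => st.1 ++ (PySem.List.pyRange c.1 (c.2 + 1)).map pvPad

def parse_test_spec_alt (spec : String) (total : Int) : List String :=
  if total ≤ 0 then []
  else
    pvFlush
      ((if PySem.Str.lower spec = "all" then [((1 : Int), total)]
        else
          PySem.List.sorted
            (((PySem.Str.split? spec ",").getD []).foldl (pvBStep total) [])
            (fun p => p.1)).foldl pvMergeStep ([], none))

-- ===== PRECONDITION & SPEC =====
def Spec_parse_test_spec (spec : String) (total : Int) (out : List String) : Prop :=
  out = parse_test_spec_alt spec total
instance (spec : String) (total : Int) (out : List String) :
    Decidable (Spec_parse_test_spec spec total out) := by unfold Spec_parse_test_spec; infer_instance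

-- ===== CLAIM (what is proved, stated in full; the proofs are below) =====
def Claim_equal_parse_test_spec : Prop :=
  ∀ (spec : String) (total : Int), Dom_parse_test_spec spec total →
    Spec_parse_test_spec spec total (parse_test_spec spec total)

-- ===== LEMMAS AND PROOFS =====

-- the clamped interval a single token contributes (proof-side characterisation of one token)
def pvTokIv (total : Int) (tok0 : String) : Option (Int × Int) :=
  if PySem.Str.strip tok0 = "" then none
  else if PySem.Str.isIn "-" (PySem.Str.strip tok0) then
    match (PySem.Str.splitMax? (PySem.Str.strip tok0) "-" 1).getD [] with
    | [a, b] =>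
      if PySem.Str.strIsdigit a && PySem.Str.strIsdigit b then
        if max ((PySem.Int.ofStr? a).getD 0) 1 ≤ min ((PySem.Int.ofStr? b).getD 0) total then
          some (max ((PySem.Int.ofStr? a).getD 0) 1, min ((PySem.Int.ofStr? b).getD 0) total)
        else none
      else none
    | _ => none
  else if PySem.Str.strIsdigit (PySem.Str.strip tok0) then
    if 1 ≤ (PySem.Int.ofStr? (PySem.Str.strip tok0)).getD 0 ∧
        (PySem.Int.ofStr? (PySem.Str.strip tok0)).getD 0 ≤ total then
      some ((PySem.Int.ofStr? (PySem.Str.strip tok0)).getD 0,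
            (PySem.Int.ofStr? (PySem.Str.strip tok0)).getD 0)
    else none
  else none

-- ascending emission of the merge loop, as plain integers
def pvE (clo chi : Int) : List (Int × Int) → List Int
  | [] => PySem.List.pyRange clo (chi + 1)
  | p :: rest =>
    if p.1 ≤ chi then pvE clo (max chi p.2) rest
    else PySem.List.pyRange clo (chi + 1) ++ pvE p.1 p.2 rest

theorem memRangeFold (total : Int) (L : List Int) (req : PySem.Set Int) (x : Int) :
    (x ∈ L.foldl (fun r i => if 1 ≤ i ∧ i ≤ total then r.add i else r) req) ↔
      x ∈ req ∨ (x ∈ L ∧ 1 ≤ x ∧ x ≤ total) := by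
  induction L generalizing req with
  | nil => simp
  | cons h t ih =>
    simp only [List.foldl_cons, List.mem_cons]
    rw [ih]
    by_cases hc : 1 ≤ h ∧ h ≤ total
    · rw [if_pos hc, PySem.Set.mem_add]
      constructor
      · rintro ((hx | rfl) | ⟨hm, hb⟩)
        · exact Or.inl hx
        · exact Or.inr ⟨Or.inl rfl, hc⟩
        · exact Or.inr ⟨Or.inr hm, hb⟩
      · rintro (hx | ⟨(rfl | hm), hb⟩)
        · exact Or.inl (Or.inl hx)
        · exact Or.inl (Or.inr rfl)
        · exact Or.inr ⟨hm, hb⟩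
    · rw [if_neg hc]
      constructor
      · rintro (hx | ⟨hm, hb⟩)
        · exact Or.inl hx
        · exact Or.inr ⟨Or.inr hm, hb⟩
      · rintro (hx | ⟨(rfl | hm), hb⟩)
        · exact Or.inl hx
        · exact absurd hb hc
        · exact Or.inr ⟨hm, hb⟩

theorem nodupRangeFold (total : Int) (L : List Int) (req : PySem.Set Int) (h : req.Nodup) :
    (L.foldl (fun r i => if 1 ≤ i ∧ i ≤ total then r.add i else r) req).Nodup := by
  induction L generalizing req with
  | nil => exact h
  | cons a t ih =>
    simp only [List.foldl_cons]
    by_cases hc : 1 ≤ a ∧ a ≤ total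
    · rw [if_pos hc]; exact ih _ (PySem.Set.nodup_add req a h)
    · rw [if_neg hc]; exact ih _ h

set_option maxHeartbeats 1000000 in
theorem memAStep (total : Int) (req : PySem.Set Int) (t : String) (x : Int) :
    (x ∈ pvAStep total req t) ↔
      x ∈ req ∨ ∃ lo hi, pvTokIv total t = some (lo, hi) ∧ lo ≤ x ∧ x ≤ hi := by
  unfold pvAStep pvTokIv
  by_cases h1 : PySem.Str.strip t = ""
  · rw [if_pos h1, if_pos h1]; simp
  · rw [if_neg h1, if_neg h1]
    by_cases h2 : PySem.Str.isIn "-" (PySem.Str.strip t) = true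
    · rw [if_pos h2, if_pos h2]
      rcases hs : (PySem.Str.splitMax? (PySem.Str.strip t) "-" 1).getD [] with _ | ⟨a, _ | ⟨b, _ | ⟨c, l⟩⟩⟩ <;> dsimp only
      · simp
      · simp
      · by_cases hd : (PySem.Str.strIsdigit a && PySem.Str.strIsdigit b) = true
        · rw [if_pos hd, if_pos hd]
          by_cases hse : (PySem.Int.ofStr? a).getD 0 ≤ (PySem.Int.ofStr? b).getD 0
          · rw [if_pos hse, memRangeFold]
            by_cases hcl : max ((PySem.Int.ofStr? a).getD 0) 1 ≤ min ((PySem.Int.ofStr? b).getD 0) total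
            · rw [if_pos hcl]
              constructor
              · rintro (hx | ⟨hm, hb⟩)
                · exact Or.inl hx
                · rw [PySem.List.mem_pyRange_one] at hm
                  exact Or.inr ⟨max ((PySem.Int.ofStr? a).getD 0) 1,
                    min ((PySem.Int.ofStr? b).getD 0) total, rfl,
                    max_le_iff.mpr ⟨hm.1, hb.1⟩, le_min_iff.mpr ⟨by omega, hb.2⟩⟩
              · rintro (hx | ⟨lo, hi, heq, hx1, hx2⟩)
                · exact Or.inl hx
                · simp only [Option.some.injEq, Prod.mk.injEq] at heq
                  obtain ⟨rfl, rfl⟩ := heq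
                  rw [max_le_iff] at hx1
                  rw [le_min_iff] at hx2
                  refine Or.inr ⟨?_, hx1.2, hx2.2⟩
                  rw [PySem.List.mem_pyRange_one]
                  exact ⟨hx1.1, by omega⟩
            · rw [if_neg hcl]
              constructor
              · rintro (hx | ⟨hm, hb⟩)
                · exact Or.inl hx
                · rw [PySem.List.mem_pyRange_one] at hm
                  exfalso
                  apply hcl
                  simp only [max_le_iff, le_min_iff]
                  refine ⟨⟨?_, ?_⟩, ?_, ?_⟩ <;> omega
              · rintro (hx | ⟨lo, hi, heq, _, _⟩)
                · exact Or.inl hx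
                · exact absurd heq (by simp)
          · have hcl : ¬ max ((PySem.Int.ofStr? a).getD 0) 1 ≤ min ((PySem.Int.ofStr? b).getD 0) total := by
              simp only [max_le_iff, le_min_iff]
              omega
            rw [if_neg hse, if_neg hcl]
            constructor
            · exact Or.inl
            · rintro (hx | ⟨lo, hi, heq, _, _⟩)
              · exact hx
              · exact absurd heq (by simp)
        · rw [if_neg hd, if_neg hd]; simp
      · simp
    · rw [if_neg h2, if_neg h2]
      by_cases h3 : PySem.Str.strIsdigit (PySem.Str.strip t) = true
      · rw [if_pos h3, if_pos h3]
        by_cases h4 : 1 ≤ (PySem.Int.ofStr? (PySem.Str.strip t)).getD 0 ∧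
            (PySem.Int.ofStr? (PySem.Str.strip t)).getD 0 ≤ total
        · rw [if_pos h4, if_pos h4, PySem.Set.mem_add]
          constructor
          · rintro (hx | rfl)
            · exact Or.inl hx
            · exact Or.inr ⟨_, _, rfl, le_refl _, le_refl _⟩
          · rintro (hx | ⟨lo, hi, heq, hx1, hx2⟩)
            · exact Or.inl hx
            · simp only [Option.some.injEq, Prod.mk.injEq] at heq
              obtain ⟨rfl, rfl⟩ := heq
              exact Or.inr (by omega)
        · rw [if_neg h4, if_neg h4]; simp
      · rw [if_neg h3, if_neg h3]; simp

theorem nodupAStep (total : Int) (req : PySem.Set Int) (t : String) (h : req.Nodup) :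
    (pvAStep total req t).Nodup := by
  unfold pvAStep
  by_cases h1 : PySem.Str.strip t = ""
  · rw [if_pos h1]; exact h
  · rw [if_neg h1]
    by_cases h2 : PySem.Str.isIn "-" (PySem.Str.strip t) = true
    · rw [if_pos h2]
      rcases hs : (PySem.Str.splitMax? (PySem.Str.strip t) "-" 1).getD [] with _ | ⟨a, _ | ⟨b, _ | ⟨c, l⟩⟩⟩ <;> dsimp only
      · exact h
      · exact h
      · by_cases hd : (PySem.Str.strIsdigit a && PySem.Str.strIsdigit b) = true
        · rw [if_pos hd]
          by_cases hse : (PySem.Int.ofStr? a).getD 0 ≤ (PySem.Int.ofStr? b).getD 0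
          · rw [if_pos hse]; exact nodupRangeFold total _ _ h
          · rw [if_neg hse]; exact h
        · rw [if_neg hd]; exact h
      · exact h
    · rw [if_neg h2]
      by_cases h3 : PySem.Str.strIsdigit (PySem.Str.strip t) = true
      · rw [if_pos h3]
        by_cases h4 : 1 ≤ (PySem.Int.ofStr? (PySem.Str.strip t)).getD 0 ∧
            (PySem.Int.ofStr? (PySem.Str.strip t)).getD 0 ≤ total
        · rw [if_pos h4]; exact PySem.Set.nodup_add req _ h
        · rw [if_neg h4]; exact h
      · rw [if_neg h3]; exact h

theorem memAFold (total : Int) (toks : List String) (req : PySem.Set Int) (x : Int) :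
    (x ∈ toks.foldl (pvAStep total) req) ↔
      x ∈ req ∨ ∃ t ∈ toks, ∃ lo hi, pvTokIv total t = some (lo, hi) ∧ lo ≤ x ∧ x ≤ hi := by
  induction toks generalizing req with
  | nil => simp
  | cons t ts ih =>
    simp only [List.foldl_cons, List.mem_cons]
    rw [ih, memAStep]
    constructor
    · rintro ((hx | hc) | ⟨u, hu, hc⟩)
      · exact Or.inl hx
      · exact Or.inr ⟨t, Or.inl rfl, hc⟩
      · exact Or.inr ⟨u, Or.inr hu, hc⟩
    · rintro (hx | ⟨u, (rfl | hu), hc⟩)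
      · exact Or.inl (Or.inl hx)
      · exact Or.inl (Or.inr hc)
      · exact Or.inr ⟨u, hu, hc⟩

theorem nodupAFold (total : Int) (toks : List String) (req : PySem.Set Int) (h : req.Nodup) :
    (toks.foldl (pvAStep total) req).Nodup := by
  induction toks generalizing req with
  | nil => exact h
  | cons t ts ih => exact ih _ (nodupAStep total req t h)

theorem bStepEq (total : Int) (acc : List (Int × Int)) (t : String) :
    pvBStep total acc t = acc ++ (pvTokIv total t).toList := by
  unfold pvBStep pvTokIv
  by_cases h1 : PySem.Str.strip t = ""
  · rw [if_pos h1, if_pos h1]; simp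
  · rw [if_neg h1, if_neg h1]
    by_cases h2 : PySem.Str.isIn "-" (PySem.Str.strip t) = true
    · rw [if_pos h2, if_pos h2]
      rcases hs : (PySem.Str.splitMax? (PySem.Str.strip t) "-" 1).getD [] with _ | ⟨a, _ | ⟨b, _ | ⟨c, l⟩⟩⟩ <;> dsimp only
      · simp
      · simp
      · by_cases hd : (PySem.Str.strIsdigit a && PySem.Str.strIsdigit b) = true
        · rw [if_pos hd, if_pos hd]
          by_cases hcl : max ((PySem.Int.ofStr? a).getD 0) 1 ≤ min ((PySem.Int.ofStr? b).getD 0) total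
          · rw [if_pos hcl, if_pos hcl]; rfl
          · rw [if_neg hcl, if_neg hcl]; simp
        · rw [if_neg hd, if_neg hd]; simp
      · simp
    · rw [if_neg h2, if_neg h2]
      by_cases h3 : PySem.Str.strIsdigit (PySem.Str.strip t) = true
      · rw [if_pos h3, if_pos h3]
        by_cases h4 : 1 ≤ (PySem.Int.ofStr? (PySem.Str.strip t)).getD 0 ∧
            (PySem.Int.ofStr? (PySem.Str.strip t)).getD 0 ≤ total
        · rw [if_pos h4, if_pos h4]; rfl
        · rw [if_neg h4, if_neg h4]; simp
      · rw [if_neg h3, if_neg h3]; simp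

theorem bFoldEq (total : Int) (toks : List String) (acc : List (Int × Int)) :
    toks.foldl (pvBStep total) acc = acc ++ toks.filterMap (pvTokIv total) := by
  induction toks generalizing acc with
  | nil => simp
  | cons t ts ih =>
    simp only [List.foldl_cons, List.filterMap_cons]
    rw [bStepEq, ih]
    cases h : pvTokIv total t <;> simp

theorem tokIv_le (total : Int) (t : String) (lo hi : Int)
    (h : pvTokIv total t = some (lo, hi)) : lo ≤ hi := by
  unfold pvTokIv at h
  by_cases h1 : PySem.Str.strip t = ""
  · rw [if_pos h1] at h; exact absurd h (by simp)
  · rw [if_neg h1] at h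
    by_cases h2 : PySem.Str.isIn "-" (PySem.Str.strip t) = true
    · rw [if_pos h2] at h
      rcases hs : (PySem.Str.splitMax? (PySem.Str.strip t) "-" 1).getD [] with _ | ⟨a, _ | ⟨b, _ | ⟨c, l⟩⟩⟩ <;>
        simp only [hs] at h
      · exact absurd h (by simp)
      · exact absurd h (by simp)
      · by_cases hd : (PySem.Str.strIsdigit a && PySem.Str.strIsdigit b) = true
        · rw [if_pos hd] at h
          by_cases hcl : max ((PySem.Int.ofStr? a).getD 0) 1 ≤ min ((PySem.Int.ofStr? b).getD 0) total
          · rw [if_pos hcl] at h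
            simp only [Option.some.injEq, Prod.mk.injEq] at h
            obtain ⟨rfl, rfl⟩ := h
            exact hcl
          · rw [if_neg hcl] at h; exact absurd h (by simp)
        · rw [if_neg hd] at h; exact absurd h (by simp)
      · exact absurd h (by simp)
    · rw [if_neg h2] at h
      by_cases h3 : PySem.Str.strIsdigit (PySem.Str.strip t) = true
      · rw [if_pos h3] at h
        by_cases h4 : 1 ≤ (PySem.Int.ofStr? (PySem.Str.strip t)).getD 0 ∧
            (PySem.Int.ofStr? (PySem.Str.strip t)).getD 0 ≤ total
        · rw [if_pos h4] at h
          simp only [Option.some.injEq, Prod.mk.injEq] at h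
          obtain ⟨rfl, rfl⟩ := h
          exact le_refl _
        · rw [if_neg h4] at h; exact absurd h (by simp)
      · rw [if_neg h3] at h; exact absurd h (by simp)

theorem pvE_props (rest : List (Int × Int)) : ∀ clo chi : Int, clo ≤ chi →
    (∀ p ∈ rest, clo ≤ p.1 ∧ p.1 ≤ p.2) →
    rest.Pairwise (fun p q => p.1 ≤ q.1) →
    (pvE clo chi rest).Pairwise (· < ·) ∧
      ∀ x, x ∈ pvE clo chi rest ↔ (clo ≤ x ∧ x ≤ chi) ∨ ∃ p ∈ rest, p.1 ≤ x ∧ x ≤ p.2 := by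
  induction rest with
  | nil =>
    intro clo chi _ _ _
    refine ⟨PySem.List.pairwise_lt_pyRange_one _ _, fun x => ?_⟩
    rw [pvE, PySem.List.mem_pyRange_one]
    constructor
    · intro h; exact Or.inl ⟨h.1, by omega⟩
    · rintro (⟨h1, h2⟩ | ⟨p, hp, _⟩)
      · exact ⟨h1, by omega⟩
      · simp at hp
  | cons p rest ih =>
    intro clo chi hle hbnd hpw
    have hp := hbnd p (List.mem_cons_self)
    have hrest : ∀ q ∈ rest, p.1 ≤ q.1 := fun q hq => (List.pairwise_cons.mp hpw).1 q hq
    have hpw' : rest.Pairwise (fun p q => p.1 ≤ q.1) := (List.pairwise_cons.mp hpw).2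
    by_cases hc : p.1 ≤ chi
    · have hbnd' : ∀ q ∈ rest, clo ≤ q.1 ∧ q.1 ≤ q.2 := fun q hq =>
        ⟨le_trans hp.1 (hrest q hq), (hbnd q (List.mem_cons_of_mem _ hq)).2⟩
      obtain ⟨hpw2, hmem⟩ := ih clo (max chi p.2) (by omega) hbnd' hpw'
      rw [pvE]
      simp only [hc, if_true]
      refine ⟨hpw2, fun x => ?_⟩
      rw [hmem x]
      constructor
      · rintro (⟨h1, h2⟩ | hq)
        · by_cases hx : x ≤ chi
          · exact Or.inl ⟨h1, hx⟩
          · exact Or.inr ⟨p, List.mem_cons_self, by omega, by omega⟩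
        · obtain ⟨q, hq1, hq2⟩ := hq
          exact Or.inr ⟨q, List.mem_cons_of_mem _ hq1, hq2⟩
      · rintro (⟨h1, h2⟩ | ⟨q, hq1, hq2⟩)
        · exact Or.inl ⟨h1, by omega⟩
        · rcases List.mem_cons.mp hq1 with rfl | hq1'
          · exact Or.inl ⟨by have := hp.1; omega, by omega⟩
          · exact Or.inr ⟨q, hq1', hq2⟩
    · have hbnd' : ∀ q ∈ rest, p.1 ≤ q.1 ∧ q.1 ≤ q.2 := fun q hq =>
        ⟨hrest q hq, (hbnd q (List.mem_cons_of_mem _ hq)).2⟩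
      obtain ⟨hpw2, hmem⟩ := ih p.1 p.2 hp.2 hbnd' hpw'
      rw [pvE]
      simp only [hc, if_false]
      constructor
      · rw [List.pairwise_append]
        refine ⟨PySem.List.pairwise_lt_pyRange_one _ _, hpw2, fun a ha b hb => ?_⟩
        rw [PySem.List.mem_pyRange_one] at ha
        have hb' := (hmem b).mp hb
        rcases hb' with ⟨h1, _⟩ | ⟨q, hq1, hq2⟩
        · omega
        · have := hbnd' q hq1; omega
      · intro x
        rw [List.mem_append, PySem.List.mem_pyRange_one, hmem x]
        constructor
        · rintro (⟨h1, h2⟩ | (⟨h1, h2⟩ | ⟨q, hq1, hq2⟩))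
          · exact Or.inl ⟨h1, by omega⟩
          · exact Or.inr ⟨p, List.mem_cons_self, h1, h2⟩
          · exact Or.inr ⟨q, List.mem_cons_of_mem _ hq1, hq2⟩
        · rintro (⟨h1, h2⟩ | ⟨q, hq1, hq2⟩)
          · exact Or.inl ⟨h1, by omega⟩
          · rcases List.mem_cons.mp hq1 with rfl | hq1'
            · exact Or.inr (Or.inl ⟨hq2.1, hq2.2⟩)
            · exact Or.inr (Or.inr ⟨q, hq1', hq2⟩)

theorem flushFold (ivs : List (Int × Int)) : ∀ (out : List String) (clo chi : Int),
    pvFlush (ivs.foldl pvMergeStep (out, some (clo, chi))) = out ++ (pvE clo chi ivs).map pvPad := by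
  induction ivs with
  | nil => intro out clo chi; rfl
  | cons p rest ih =>
    intro out clo chi
    simp only [List.foldl_cons]
    by_cases hc : p.1 ≤ chi
    · rw [show pvMergeStep (out, some (clo, chi)) p = (out, some (clo, max chi p.2)) from by
        simp [pvMergeStep, hc]]
      rw [ih out clo (max chi p.2)]
      simp only [pvE, if_pos hc]
    · rw [show pvMergeStep (out, some (clo, chi)) p =
          (out ++ (PySem.List.pyRange clo (chi + 1)).map pvPad, some p) from by
        simp [pvMergeStep, hc]]
      rw [ih _ p.1 p.2]
      simp only [pvE, if_neg hc, List.map_append, List.append_assoc]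

theorem flushFoldTopCons (p : Int × Int) (rest : List (Int × Int)) :
    pvFlush ((p :: rest).foldl pvMergeStep ([], none)) = (pvE p.1 p.2 rest).map pvPad := by
  simp only [List.foldl_cons]
  show pvFlush (rest.foldl pvMergeStep ([], some p)) = _
  rw [flushFold rest [] p.1 p.2]
  simp

-- ===== VERDICT (by name: the statement is the Claim_ definition above) =====
theorem parse_test_spec_spec : Claim_equal_parse_test_spec := by
  unfold Claim_equal_parse_test_spec Spec_parse_test_spec
  intro spec total _
  unfold parse_test_spec parse_test_spec_alt
  by_cases h0 : total ≤ 0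
  · rw [if_pos h0, if_pos h0]
  · rw [if_neg h0, if_neg h0]
    by_cases hall : PySem.Str.lower spec = "all"
    · rw [if_pos hall, if_pos hall, flushFoldTopCons]
      rw [pvE]
    · rw [if_neg hall, if_neg hall, bFoldEq]
      simp only [List.nil_append]
      set toks := (PySem.Str.split? spec ",").getD [] with htoks
      set req := toks.foldl (pvAStep total) PySem.Set.empty with hreq
      set ivs := toks.filterMap (pvTokIv total) with hivs
      have hmemreq : ∀ x, x ∈ req ↔ ∃ p ∈ ivs, p.1 ≤ x ∧ x ≤ p.2 := by
        intro x
        rw [hreq, memAFold]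
        constructor
        · rintro (hx | ⟨t, ht, lo, hi, heq, hx1, hx2⟩)
          · exact absurd hx (by simp [PySem.Set.empty])
          · exact ⟨(lo, hi), List.mem_filterMap.mpr ⟨t, ht, heq⟩, hx1, hx2⟩
        · rintro ⟨⟨lo, hi⟩, hp, hx1, hx2⟩
          obtain ⟨t, ht, heq⟩ := List.mem_filterMap.mp hp
          exact Or.inr ⟨t, ht, lo, hi, heq, hx1, hx2⟩
      have hivle : ∀ p ∈ ivs, p.1 ≤ p.2 := by
        rintro ⟨lo, hi⟩ hp
        obtain ⟨t, _, heq⟩ := List.mem_filterMap.mp hp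
        exact tokIv_le total t lo hi heq
      have hnreq : req.Nodup := nodupAFold total toks _ (by simp [PySem.Set.empty])
      cases hsrt : PySem.List.sorted ivs (fun p => p.1) with
      | nil =>
        have hivnil : ivs = [] := by
          have hpm := PySem.List.sorted_perm ivs (fun p => p.1) false
          rw [hsrt] at hpm
          exact List.nil_perm.mp hpm
        have hreqnil : req = [] := by
          apply List.eq_nil_iff_forall_not_mem.mpr
          intro x hx
          rw [hmemreq x, hivnil] at hx
          simp at hx
        rw [hreqnil]
        rfl
      | cons p rest =>
        rw [flushFoldTopCons]
        have hperm : (p :: rest).Perm ivs := by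
          rw [← hsrt]; exact PySem.List.sorted_perm ivs (fun p => p.1) false
        have hpwsort := PySem.List.sorted_pairwise ivs (fun p => p.1)
        rw [hsrt] at hpwsort
        have hple : p.1 ≤ p.2 := hivle p (hperm.mem_iff.mp List.mem_cons_self)
        have hbnd : ∀ q ∈ rest, p.1 ≤ q.1 ∧ q.1 ≤ q.2 := by
          intro q hq
          exact ⟨(List.pairwise_cons.mp hpwsort).1 q hq,
            hivle q (hperm.mem_iff.mp (List.mem_cons_of_mem _ hq))⟩
        obtain ⟨hpw, hmem⟩ := pvE_props rest p.1 p.2 hple hbnd (List.pairwise_cons.mp hpwsort).2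
        have hsorted : PySem.List.sorted req (fun x => x) = pvE p.1 p.2 rest := by
          apply PySem.List.sorted_eq_of_perm_of_pairwise_lt
          · apply (List.perm_ext_iff_of_nodup (hpw.imp fun h => ne_of_lt h) hnreq).mpr
            intro x
            rw [hmem x, hmemreq x]
            constructor
            · rintro (⟨h1, h2⟩ | ⟨q, hq, hx⟩)
              · exact ⟨p, hperm.mem_iff.mp List.mem_cons_self, h1, h2⟩
              · exact ⟨q, hperm.mem_iff.mp (List.mem_cons_of_mem _ hq), hx⟩
            · rintro ⟨q, hq, hx⟩
              rcases List.mem_cons.mp (hperm.mem_iff.mpr hq) with rfl | hq'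
              · exact Or.inl hx
              · exact Or.inr ⟨q, hq', hx⟩
          · exact hpw
        rw [hsorted]
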